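-- pv_equiv track=rewrite | github.com/jinit-jain/investor-buddy | Analyze_Sentiment.py | find_organ_context
-- ===== SOURCE A (Python) =====
-- def find_organ_context(document, organization):
--     count_sentences = 0
--     organ_to_sentenceid = {}
--     for sentence in document.split('.'):
--         count_sentences += 1
--         for organ in organization.keys():
--             if organ in sentence.lower():
--                 if organ not in organ_to_sentenceid:
--                     organ_to_sentenceid[organ] = list()
--                 organ_to_sentenceid[organ].append(count_sentences)
--     return organ_to_sentenceid, count_sentences
-- ===== SOURCE B (Python) =====
-- def find_organ_context(document, organization):
--     sentences = [s.lower() for s in document.split('.')]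
--     rows = []
--     for organ in organization:
--         ids = [i for i, s in enumerate(sentences, 1) if organ in s]
--         if ids:
--             rows.append((organ, ids))
--     rows.sort(key=lambda row: row[1][0])
--     return dict(rows), len(sentences)
-- ===== Notes on version B (the rewrite author's own statement) =====
-- stated objective: alternative
-- what changed: B traverses organization-major (computing each org's complete match-index list over once-lowercased sentences) and recovers A's dict insertion order with one stable sort by first matching sentence index, instead of A's sentence-major nested loop that lowercases the sentence per org and grows the dict incrementally.
import Mathlib
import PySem

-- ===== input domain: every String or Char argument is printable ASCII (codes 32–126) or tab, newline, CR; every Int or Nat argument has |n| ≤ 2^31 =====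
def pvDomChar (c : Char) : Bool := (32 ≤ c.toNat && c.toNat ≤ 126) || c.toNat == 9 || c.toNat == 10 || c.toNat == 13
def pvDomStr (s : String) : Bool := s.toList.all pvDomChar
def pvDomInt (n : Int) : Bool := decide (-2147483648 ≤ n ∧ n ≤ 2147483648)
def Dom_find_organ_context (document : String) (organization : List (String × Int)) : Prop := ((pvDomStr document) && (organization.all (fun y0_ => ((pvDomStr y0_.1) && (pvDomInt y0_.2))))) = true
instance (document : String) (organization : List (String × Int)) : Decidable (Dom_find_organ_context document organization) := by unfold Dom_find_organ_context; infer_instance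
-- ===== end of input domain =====

-- B is an alternative exact strategy: org-major collection of match lists over once-lowercased
-- sentences, then one stable sort by first matching sentence index restores A's dict order.

-- ===== PORT A =====
-- A's loop body over one sentence: the counter and the dict are the carried state.
def pvAStep (keys : List String) (st : Int × PySem.Dict String (List Int)) (sentence : String) :
    Int × PySem.Dict String (List Int) :=
  let c := st.1 + 1
  (c, keys.foldl (fun d organ =>
      if PySem.Str.isIn organ (PySem.Str.lower sentence) then
        let d' := if d.contains organ then d else d.insert organ ([] : List Int)
        d'.insert organ (d'.getD organ [] ++ [c])
      else d) st.2)

def find_organ_context (document : String) (organization : List (String × Int)) :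
    (List (String × List Int)) × Int :=
  -- organization is a Python dict: its keys() are the distinct first components, in first-insertion order
  let keys := PySem.List.dedup (organization.map Prod.fst)
  let st := ((PySem.Str.split? document ".").getD []).foldl (pvAStep keys) (0, PySem.Dict.empty)
  (st.2.items, st.1)

-- ===== PORT B =====
-- B's per-org comprehension: [i for i, s in enumerate(sentences, 1) if organ in s]
def pvBIds (sentences : List String) (organ : String) : List Int :=
  ((PySem.List.enumerate sentences 1).filter (fun p => PySem.Str.isIn organ p.2)).map (·.1)

def find_organ_context_alt (document : String) (organization : List (String × Int)) :
    (List (String × List Int)) × Int :=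
  let sentences := ((PySem.Str.split? document ".").getD []).map PySem.Str.lower
  let rows := (PySem.List.dedup (organization.map Prod.fst)).foldl
      (fun rows organ =>
        let ids := pvBIds sentences organ
        if ids = [] then rows else rows ++ [(organ, ids)]) []
  -- rows.sort(key=lambda row: row[1][0]); every kept row has nonempty ids, so row[1][0] = headD 0
  let rows := PySem.List.sorted rows (fun row => row.2.headD 0)
  ((PySem.Dict.ofList rows).items, (sentences.length : Int))

-- ===== PRECONDITION & SPEC =====
def Spec_find_organ_context (document : String) (organization : List (String × Int)) (out : (List (String × List Int)) × Int) : Prop := out = find_organ_context_alt document organization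
instance (document : String) (organization : List (String × Int)) (out : (List (String × List Int)) × Int) : Decidable (Spec_find_organ_context document organization out) := by unfold Spec_find_organ_context; infer_instance

-- ===== CLAIM (what is proved, stated in full; the proofs are below) =====
def Claim_equal_find_organ_context : Prop := ∀ (document : String) (organization : List (String × Int)), Dom_find_organ_context document organization → Spec_find_organ_context document organization (find_organ_context document organization)

-- ===== LEMMAS AND PROOFS =====

-- proof-side vocabulary
def pvMatched (s organ : String) : Bool := PySem.Str.isIn organ (PySem.Str.lower s)

def pvIds (ss : List String) (o : String) : List Int :=
  ((PySem.List.enumerate ss 1).filter (fun p => pvMatched p.2 o)).map (·.1)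

def pvRows (K ss : List String) : List (String × List Int) :=
  (K.filter (fun o => !decide (pvIds ss o = []))).map (fun o => (o, pvIds ss o))

def pvKey (r : String × List Int) : Int := r.2.headD 0

-- A's inner loop over keys, for one sentence s with 1-based index i
def pvInner (K : List String) (i : Int) (s : String) (d : PySem.Dict String (List Int)) :
    PySem.Dict String (List Int) :=
  K.foldl (fun d organ =>
      if pvMatched s organ then
        let d' := if d.contains organ then d else d.insert organ ([] : List Int)
        d'.insert organ (d'.getD organ [] ++ [i])
      else d) d

def pvUpd (K : List String) (s : String) (i : Int) (r : String × List Int) : String × List Int :=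
  if r.1 ∈ K ∧ pvMatched s r.1 then (r.1, r.2 ++ [i]) else r

def pvNews (K : List String) (s : String) (i : Int) (d : PySem.Dict String (List Int)) :
    List (String × List Int) :=
  (K.filter (fun o => pvMatched s o && !d.contains o)).map (fun o => (o, ([i] : List Int)))

-- (1) the counter component
theorem pvA_count (K : List String) : ∀ (ss : List String) (c : Int) (d : PySem.Dict String (List Int)),
    (ss.foldl (pvAStep K) (c, d)).1 = c + ss.length := by
  intro ss
  induction ss with
  | nil => intro c d; simp
  | cons s t ih =>
      intro c d
      show ((t.foldl (pvAStep K) (pvAStep K (c, d) s))).1 = _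
      rw [show pvAStep K (c, d) s = (c + 1, (pvAStep K (c, d) s).2) from rfl, ih]
      simp; omega

-- (2) A's fold as a fold over enumerated sentences
theorem pvA_fold (K : List String) : ∀ (ss : List String) (c : Int) (d : PySem.Dict String (List Int)),
    (ss.foldl (pvAStep K) (c, d)).2
      = (PySem.List.enumerate ss (c + 1)).foldl (fun d p => pvInner K p.1 p.2 d) d := by
  intro ss
  induction ss with
  | nil => intro c d; simp [PySem.List.enumerate_nil]
  | cons s t ih =>
      intro c d
      rw [PySem.List.enumerate_cons]
      show ((t.foldl (pvAStep K) (pvAStep K (c, d) s))).2 = _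
      rw [show pvAStep K (c, d) s = (c + 1, pvInner K (c + 1) s d) from rfl, ih]
      rfl

-- (3) one inner pass, characterised on the items list
theorem pvInner_items (K : List String) (hK : K.Nodup) (i : Int) (s : String)
    (d : PySem.Dict String (List Int)) (hd : d.keys.Nodup) :
    (pvInner K i s d).items = d.items.map (pvUpd K s i) ++ pvNews K s i d := by
  induction K generalizing d with
  | nil =>
      simp only [pvInner, List.foldl_nil, pvNews, List.filter_nil, List.map_nil, List.append_nil]
      have h : List.map (pvUpd [] s i) d.items = List.map id d.items := by
        apply List.map_congr_left
        intro p _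
        simp [pvUpd]
      rw [h, List.map_id]
  | cons o K' ih =>
      have hK' : K'.Nodup := (List.nodup_cons.mp hK).2
      have hoK' : o ∉ K' := (List.nodup_cons.mp hK).1
      have hmemfst : ∀ p ∈ d.items, d.contains p.1 = true := by
        intro p hp
        rw [PySem.Dict.contains_iff_mem_keys]
        exact List.mem_map_of_mem hp
      have hstep : pvInner (o :: K') i s d
          = pvInner K' i s (if pvMatched s o then
              (let d' := if d.contains o then d else d.insert o ([] : List Int)
               d'.insert o (d'.getD o [] ++ [i])) else d) := rfl
      by_cases hm : pvMatched s o
      · by_cases hc : d.contains o = true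
        · -- o already present: its value gets i appended, in place
          have hd1 : (if pvMatched s o then
                (let d' := if d.contains o then d else d.insert o ([] : List Int)
                 d'.insert o (d'.getD o [] ++ [i])) else d)
              = d.insert o (d.getD o [] ++ [i]) := by
            simp [hm, hc]
          have hd1keys : (d.insert o (d.getD o [] ++ [i])).keys = d.keys :=
            PySem.Dict.keys_insert_of_contains d _ hc
          have hd1nodup : (d.insert o (d.getD o [] ++ [i])).keys.Nodup := by
            rw [hd1keys]; exact hd
          have hd1items : (d.insert o (d.getD o [] ++ [i])).items
              = d.items.map (fun r => if r.1 = o then (r.1, r.2 ++ [i]) else r) := by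
            rw [PySem.Dict.items_insert_of_contains d _ hc]
            apply List.map_congr_left
            intro p hp
            by_cases hpo : p.1 = o
            · have hval : d.getD p.1 [] = p.2 := by
                rcases p with ⟨k, w⟩
                exact PySem.Dict.getD_of_mem_items d hp hd []
              rw [← hpo, ← hval]
              simp [hpo]
            · simp [hpo]
          have hd1cont : ∀ o', (d.insert o (d.getD o [] ++ [i])).contains o' = d.contains o' := by
            intro o'
            rw [PySem.Dict.contains_insert]
            by_cases h : o' = o
            · subst h; simp [hc]
            · simp [h]
          have hnews0 : pvNews (o :: K') s i d = pvNews K' s i d := by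
            unfold pvNews
            rw [List.filter_cons]
            simp [hm, hc]
          have hnews1 : pvNews K' s i (d.insert o (d.getD o [] ++ [i])) = pvNews K' s i d := by
            unfold pvNews
            congr 1
            apply List.filter_congr
            intro o' _
            rw [hd1cont o']
          have hmap2 : d.items.map (pvUpd (o :: K') s i)
              = ((d.items.map (fun r => if r.1 = o then (r.1, r.2 ++ [i]) else r)).map
                  (pvUpd K' s i)) := by
            rw [List.map_map]
            apply List.map_congr_left
            intro r _
            by_cases hro : r.1 = o
            · simp only [Function.comp_apply, if_pos hro]
              simp [pvUpd, hro, hoK', hm]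
            · simp only [Function.comp_apply, if_neg hro]
              simp [pvUpd, hro, List.mem_cons]
          rw [hstep, hd1, ih hK' _ hd1nodup, hd1items, hnews0, hnews1, ← hmap2]
        · -- o is new: a fresh row (o, [i]) is appended at the end
          rw [Bool.not_eq_true] at hc
          have hd1 : (if pvMatched s o then
                (let d' := if d.contains o then d else d.insert o ([] : List Int)
                 d'.insert o (d'.getD o [] ++ [i])) else d)
              = (d.insert o ([] : List Int)).insert o [i] := by
            simp [hm, hc, PySem.Dict.getD_insert_self]
          have hfstne : ∀ p ∈ d.items, p.1 ≠ o := by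
            intro p hp he
            rw [← he] at hc
            rw [hmemfst p hp] at hc
            exact absurd hc (by decide)
          have hc0 : (d.insert o ([] : List Int)).contains o = true := by
            rw [PySem.Dict.contains_insert]; simp
          have hd1items : ((d.insert o ([] : List Int)).insert o [i]).items
              = d.items ++ [(o, [i])] := by
            rw [PySem.Dict.items_insert_of_contains _ _ hc0,
                PySem.Dict.items_insert_of_not_contains d _ hc]
            rw [List.map_append]
            congr 1
            · have h : List.map (fun p => if p.1 == o then (o, ([i] : List Int)) else p) d.items
                  = List.map id d.items := by
                apply List.map_congr_left
                intro p hp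
                simp [hfstne p hp]
              rw [h, List.map_id]
            · simp
          have hd1keys : ((d.insert o ([] : List Int)).insert o [i]).keys
              = d.keys ++ [o] := by
            rw [PySem.Dict.keys_insert_of_contains _ _ hc0,
                PySem.Dict.keys_insert_of_not_contains d _ hc]
          have hd1nodup : ((d.insert o ([] : List Int)).insert o [i]).keys.Nodup := by
            rw [hd1keys]
            rw [List.nodup_append]
            refine ⟨hd, List.nodup_singleton o, ?_⟩
            intro a ha b hb
            have hb' : b = o := by simpa using hb
            subst hb'
            rintro rfl
            rw [← PySem.Dict.contains_iff_mem_keys] at ha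
            rw [ha] at hc
            exact absurd hc (by decide)
          have hd1cont : ∀ o' ∈ K', ((d.insert o ([] : List Int)).insert o [i]).contains o'
              = d.contains o' := by
            intro o' ho'
            rw [PySem.Dict.contains_insert, PySem.Dict.contains_insert]
            have hne : o' ≠ o := by rintro rfl; exact hoK' ho'
            simp [hne]
          have hnews1 : pvNews K' s i ((d.insert o ([] : List Int)).insert o [i])
              = pvNews K' s i d := by
            unfold pvNews
            congr 1
            apply List.filter_congr
            intro o' ho'
            rw [hd1cont o' ho']
          have hsingle : List.map (pvUpd K' s i) [(o, ([i] : List Int))] = [(o, [i])] := by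
            simp [pvUpd, hoK']
          have hnews2 : pvNews (o :: K') s i d = (o, ([i] : List Int)) :: pvNews K' s i d := by
            unfold pvNews
            rw [List.filter_cons]
            simp [hm, hc]
          have hmap : d.items.map (pvUpd (o :: K') s i) = d.items.map (pvUpd K' s i) := by
            apply List.map_congr_left
            intro r hr
            have hne : r.1 ≠ o := hfstne r hr
            simp [pvUpd, List.mem_cons, hne]
          rw [hstep, hd1, ih hK' _ hd1nodup, hd1items, List.map_append, hnews1, hsingle,
              hnews2, hmap]
          simp
      · -- sentence does not mention o: nothing happens for it
        have hd1 : (if pvMatched s o then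
              (let d' := if d.contains o then d else d.insert o ([] : List Int)
               d'.insert o (d'.getD o [] ++ [i])) else d) = d := by simp [hm]
        have hnews0 : pvNews (o :: K') s i d = pvNews K' s i d := by
          unfold pvNews
          rw [List.filter_cons]
          simp [hm]
        have hmap : d.items.map (pvUpd (o :: K') s i) = d.items.map (pvUpd K' s i) := by
          apply List.map_congr_left
          intro r _
          by_cases hro : r.1 = o
          · simp [pvUpd, hro, hm]
          · simp [pvUpd, hro, List.mem_cons]
        rw [hstep, hd1, ih hK' _ hd, hnews0, hmap]

-- (4) stable-sort machinery: filter classes determine the sorted list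
theorem pv_insertBy_filter {α : Type} (key : α → Int) (x : α) (v : Int) :
    ∀ ys : List α, ys.Pairwise (fun a b => key a ≤ key b) →
    (PySem.List.insertBy (fun a b => decide (key a < key b)) x ys).filter (fun r => key r == v)
      = if key x = v then ys.filter (fun r => key r == v) ++ [x]
        else ys.filter (fun r => key r == v) := by
  intro ys
  induction ys with
  | nil =>
      intro _
      by_cases h : key x = v <;> simp [PySem.List.insertBy, h]
  | cons y t ih =>
      intro hp
      by_cases hlt : key x < key y
      · have hins : PySem.List.insertBy (fun a b => decide (key a < key b)) x (y :: t)
            = x :: y :: t := by simp [PySem.List.insertBy, hlt]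
        split_ifs with hv
        · -- all keys in y :: t exceed key x = v, so their filter is empty
          have hnil : (y :: t).filter (fun r => key r == v) = [] := by
            rw [List.filter_eq_nil_iff]
            intro a ha2
            have h1 : key y ≤ key a := by
              rcases List.mem_cons.mp ha2 with rfl | ha3
              · exact le_refl _
              · exact (List.pairwise_cons.mp hp).1 a ha3
            simp only [beq_iff_eq]
            omega
          rw [hins, List.filter_cons, hnil]
          simp [beq_iff_eq, hv]
        · rw [hins, List.filter_cons]
          simp [beq_iff_eq, hv]
      · have hins : PySem.List.insertBy (fun a b => decide (key a < key b)) x (y :: t)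
            = y :: PySem.List.insertBy (fun a b => decide (key a < key b)) x t := by
          simp [PySem.List.insertBy, hlt]
        rw [hins, List.filter_cons, List.filter_cons,
            ih (List.pairwise_cons.mp hp).2]
        split_ifs <;> simp

theorem pv_sorted_filter {α : Type} (key : α → Int) (xs : List α) (v : Int) :
    (PySem.List.sorted xs key).filter (fun r => key r == v) = xs.filter (fun r => key r == v) := by
  induction xs using List.reverseRecOn with
  | nil => simp [PySem.List.sorted]
  | append_singleton t x ih =>
      have hstep : PySem.List.sorted (t ++ [x]) key
          = PySem.List.insertBy (fun a b => decide (key a < key b)) x (PySem.List.sorted t key) := by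
        rw [PySem.List.sorted_eq_foldl_insertBy, PySem.List.sorted_eq_foldl_insertBy,
            List.foldl_append]
        rfl
      rw [hstep, pv_insertBy_filter key x v _ (PySem.List.sorted_pairwise t key),
          List.filter_append]
      split_ifs with hv
      · rw [ih]
        simp [List.filter, beq_iff_eq, hv]
      · have hx : List.filter (fun r => key r == v) [x] = [] := by simp [hv]
        rw [ih, hx, List.append_nil]

theorem pv_sorted_unique {α : Type} (key : α → Int) :
    ∀ (ys zs : List α), ys.Pairwise (fun a b => key a ≤ key b) →
      zs.Pairwise (fun a b => key a ≤ key b) →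
      (∀ v, ys.filter (fun r => key r == v) = zs.filter (fun r => key r == v)) → ys = zs := by
  intro ys
  induction ys with
  | nil =>
      intro zs _ _ hf
      cases zs with
      | nil => rfl
      | cons z u =>
          have h := hf (key z)
          simp [List.filter_cons] at h
  | cons y t ih =>
      intro zs hy hz hf
      cases zs with
      | nil =>
          have h := hf (key y)
          simp [List.filter_cons] at h
      | cons z u =>
          -- the two minimal keys agree
          have hyz : key y = key z := by
            have h1 : key y ≤ key z := by
              have h := hf (key z)
              have hz' : ((y :: t).filter (fun r => key r == key z)) ≠ [] := by
                rw [h]; simp [List.filter_cons]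
              rw [ne_eq, List.filter_eq_nil_iff] at hz'
              push_neg at hz'
              obtain ⟨a, ha, hka⟩ := hz'
              have hka : key a = key z := by simpa [beq_iff_eq] using hka
              rcases List.mem_cons.mp ha with rfl | ha
              · exact le_of_eq hka
              · exact le_of_le_of_eq ((List.pairwise_cons.mp hy).1 a ha) hka
            have h2 : key z ≤ key y := by
              have h := hf (key y)
              have hy' : ((z :: u).filter (fun r => key r == key y)) ≠ [] := by
                rw [← h]; simp [List.filter_cons]
              rw [ne_eq, List.filter_eq_nil_iff] at hy'
              push_neg at hy'
              obtain ⟨a, ha, hka⟩ := hy'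
              have hka : key a = key y := by simpa [beq_iff_eq] using hka
              rcases List.mem_cons.mp ha with rfl | ha
              · exact le_of_eq hka
              · exact le_of_le_of_eq ((List.pairwise_cons.mp hz).1 a ha) hka
            omega
          have hheads := hf (key y)
          rw [List.filter_cons, List.filter_cons] at hheads
          simp [beq_iff_eq, hyz] at hheads
          obtain ⟨hyzeq, htail⟩ := hheads
          subst hyzeq
          congr 1
          apply ih u (List.pairwise_cons.mp hy).2 (List.pairwise_cons.mp hz).2
          intro v
          by_cases hv : v = key y
          · subst hv; exact htail
          · have h := hf v
            rw [List.filter_cons, List.filter_cons] at h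
            simpa [beq_iff_eq, hyz ▸ hv, Ne.symm hv, hyz] using h

theorem pv_eq_sorted {α : Type} (key : α → Int) (c xs : List α)
    (h1 : c.Pairwise (fun a b => key a ≤ key b))
    (h2 : ∀ v, c.filter (fun r => key r == v) = xs.filter (fun r => key r == v)) :
    c = PySem.List.sorted xs key := by
  apply pv_sorted_unique key c _ h1 (PySem.List.sorted_pairwise xs key)
  intro v
  rw [h2 v, pv_sorted_filter]

-- small facts about pvIds / pvKey
theorem pv_pairwise_const {α : Type} (R : α → α → Prop) (h : ∀ a b, R a b) :
    ∀ l : List α, l.Pairwise R := by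
  intro l
  induction l with
  | nil => exact List.Pairwise.nil
  | cons x t ih => exact List.Pairwise.cons (fun b _ => h x b) ih

theorem pv_headD_append (l : List Int) (i : Int) (h : l ≠ []) :
    (l ++ [i]).headD 0 = l.headD 0 := by
  cases l with
  | nil => exact absurd rfl h
  | cons a t => rfl

theorem pv_headD_mem (l : List Int) (h : l ≠ []) : l.headD 0 ∈ l := by
  cases l with
  | nil => exact absurd rfl h
  | cons a t => simp

theorem pvIds_mem_bound (ss : List String) (o : String) :
    ∀ x ∈ pvIds ss o, 1 ≤ x ∧ x ≤ (ss.length : Int) := by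
  intro x hx
  unfold pvIds at hx
  rcases List.mem_map.mp hx with ⟨p, hp, rfl⟩
  have hpe : p ∈ PySem.List.enumerate ss 1 := (List.mem_filter.mp hp).1
  rcases (PySem.List.mem_enumerate_iff ss 1 p).mp hpe with ⟨k, hk, rfl⟩
  constructor <;> · push_cast; omega

theorem pvIds_snoc (ss : List String) (s o : String) :
    pvIds (ss ++ [s]) o
      = pvIds ss o ++ (if pvMatched s o then [(1 + (ss.length : Int))] else []) := by
  unfold pvIds
  rw [PySem.List.enumerate_append, List.filter_append, List.map_append]
  congr 1
  rw [PySem.List.enumerate_cons, PySem.List.enumerate_nil]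
  by_cases hm : pvMatched s o <;> simp [List.filter_cons, hm]

theorem pvRows_map_fst (K ss : List String) :
    (pvRows K ss).map Prod.fst = K.filter (fun o => !decide (pvIds ss o = [])) := by
  unfold pvRows
  rw [List.map_map]
  have h : List.map (Prod.fst ∘ fun o => (o, pvIds ss o)) (K.filter (fun o => !decide (pvIds ss o = [])))
      = List.map id (K.filter (fun o => !decide (pvIds ss o = []))) := by
    apply List.map_congr_left
    intro o _
    rfl
  rw [h, List.map_id]

theorem pv_mem_pvRows (K ss : List String) (r : String × List Int) (hr : r ∈ pvRows K ss) :
    r.1 ∈ K ∧ r.2 = pvIds ss r.1 ∧ pvIds ss r.1 ≠ [] := by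
  unfold pvRows at hr
  rcases List.mem_map.mp hr with ⟨o, ho, rfl⟩
  have h1 := (List.mem_filter.mp ho).1
  have h2 := (List.mem_filter.mp ho).2
  simp at h2
  exact ⟨h1, rfl, h2⟩

-- the key-v class of pvRows, as a filter of the key list
theorem pv_filter_rows_eq (K ss : List String) (v : Int) :
    (pvRows K ss).filter (fun r => pvKey r == v)
      = (K.filter (fun o => !decide (pvIds ss o = []) && ((pvIds ss o).headD 0 == v))).map
          (fun o => (o, pvIds ss o)) := by
  induction K with
  | nil => rfl
  | cons o K' ih =>
      unfold pvRows at ih ⊢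
      by_cases h : pvIds ss o = []
      · simpa [List.filter_cons, h] using ih
      · by_cases hkey : (pvIds ss o).head?.getD 0 = v
        · simpa [List.filter_cons, h, hkey, pvKey] using ih
        · simpa [List.filter_cons, h, hkey, pvKey] using ih

-- (5) the main invariant
theorem pv_main (K : List String) (hK : K.Nodup) : ∀ (ss : List String),
    ((PySem.List.enumerate ss 1).foldl (fun d p => pvInner K p.1 p.2 d) PySem.Dict.empty).items
      = PySem.List.sorted (pvRows K ss) pvKey := by
  intro ss
  induction ss using List.reverseRecOn with
  | nil =>
      rw [PySem.List.enumerate_nil]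
      have hrows : pvRows K [] = [] := by
        unfold pvRows
        have h : K.filter (fun o => !decide (pvIds [] o = [])) = [] := by
          rw [List.filter_eq_nil_iff]
          intro o _
          simp [pvIds, PySem.List.enumerate_nil]
        rw [h, List.map_nil]
      rw [hrows]
      rfl
  | append_singleton ss s ih =>
      set i : Int := 1 + (ss.length : Int) with hidef
      set D := (PySem.List.enumerate ss 1).foldl (fun d p => pvInner K p.1 p.2 d) PySem.Dict.empty with hD
      have hfold : (PySem.List.enumerate (ss ++ [s]) 1).foldl (fun d p => pvInner K p.1 p.2 d) PySem.Dict.empty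
          = pvInner K i s D := by
        rw [PySem.List.enumerate_append, List.foldl_append, PySem.List.enumerate_cons,
            PySem.List.enumerate_nil]
        rfl
      have hRfstnodup : ((pvRows K ss).map Prod.fst).Nodup := by
        rw [pvRows_map_fst]
        exact hK.filter _
      have hperm : (PySem.List.sorted (pvRows K ss) pvKey).Perm (pvRows K ss) :=
        PySem.List.sorted_perm (pvRows K ss) pvKey false
      have hDkeys : D.keys = (PySem.List.sorted (pvRows K ss) pvKey).map Prod.fst := by
        show D.items.map _ = _
        rw [ih]
      have hDnodup : D.keys.Nodup := by
        rw [hDkeys]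
        exact ((hperm.map Prod.fst).nodup_iff).mpr hRfstnodup
      have hcontb : ∀ o ∈ K, D.contains o = !decide (pvIds ss o = []) := by
        intro o ho
        have hmem : o ∈ D.keys ↔ (o ∈ K ∧ ¬ pvIds ss o = []) := by
          rw [hDkeys, (hperm.map Prod.fst).mem_iff, pvRows_map_fst, List.mem_filter]
          simp
        by_cases h : pvIds ss o = []
        · have hnm : o ∉ D.keys := by
            rw [hmem]
            exact fun hc => hc.2 h
          have hc : D.contains o = false := by
            by_cases hcc : D.contains o = true
            · exact absurd ((PySem.Dict.contains_iff_mem_keys D o).mp hcc) hnm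
            · exact (Bool.not_eq_true _).mp hcc
          rw [hc]
          simp [h]
        · rw [(PySem.Dict.contains_iff_mem_keys D o).mpr (hmem.mpr ⟨ho, h⟩)]
          simp [h]
      have hupdkey : ∀ r ∈ pvRows K ss, pvKey (pvUpd K s i r) = pvKey r := by
        intro r hr
        obtain ⟨_, hval, hne⟩ := pv_mem_pvRows K ss r hr
        unfold pvUpd pvKey
        split_ifs with h
        · show (r.2 ++ [i]).headD 0 = r.2.headD 0
          exact pv_headD_append r.2 i (hval ▸ hne)
        · rfl
      have hkeylt : ∀ r ∈ pvRows K ss, pvKey r < i := by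
        intro r hr
        obtain ⟨_, hval, hne⟩ := pv_mem_pvRows K ss r hr
        have hmem : r.2.headD 0 ∈ pvIds ss r.1 := hval ▸ pv_headD_mem r.2 (hval ▸ hne)
        have := (pvIds_mem_bound ss r.1 _ hmem).2
        unfold pvKey
        omega
      have hids_ne : ∀ o, pvIds ss o ≠ [] → pvIds (ss ++ [s]) o ≠ [] := by
        intro o hne
        rw [pvIds_snoc]
        intro hcon
        exact hne (List.append_eq_nil_iff.mp hcon).1
      have hheads' : ∀ o, pvIds ss o ≠ [] →
          (pvIds (ss ++ [s]) o).headD 0 = (pvIds ss o).headD 0 := by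
        intro o hne
        rw [pvIds_snoc]
        by_cases hm : pvMatched s o
        · simp only [hm, if_true]
          exact pv_headD_append _ _ hne
        · simp [hm]
      have hheadlt : ∀ o, pvIds ss o ≠ [] → (pvIds ss o).headD 0 < i := by
        intro o hne
        have := (pvIds_mem_bound ss o _ (pv_headD_mem _ hne)).2
        omega
      rw [hfold, pvInner_items K hK i s D hDnodup, ih]
      apply pv_eq_sorted pvKey
      · -- the produced list is ordered by key
        rw [List.pairwise_append]
        refine ⟨?_, ?_, ?_⟩
        · rw [List.pairwise_map]
          apply (PySem.List.sorted_pairwise (pvRows K ss) pvKey).imp_of_mem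
          intro a b ha hb hab
          rw [hupdkey a (hperm.mem_iff.mp ha), hupdkey b (hperm.mem_iff.mp hb)]
          exact hab
        · unfold pvNews
          rw [List.pairwise_map]
          exact pv_pairwise_const _ (fun a b => le_refl i) _
        · intro a ha b hb
          rcases List.mem_map.mp ha with ⟨r, hr, rfl⟩
          have hkb : pvKey b = i := by
            unfold pvNews at hb
            rcases List.mem_map.mp hb with ⟨o, _, rfl⟩
            rfl
          rw [hkb, hupdkey r (hperm.mem_iff.mp hr)]
          exact le_of_lt (hkeylt r (hperm.mem_iff.mp hr))
      · -- key-filter classes agree with the rows of ss ++ [s]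
        intro v
        rw [List.filter_append]
        have hold : ((PySem.List.sorted (pvRows K ss) pvKey).map (pvUpd K s i)).filter
              (fun r => pvKey r == v)
            = ((pvRows K ss).filter (fun r => pvKey r == v)).map (pvUpd K s i) := by
          rw [List.filter_map]
          have h2 : (PySem.List.sorted (pvRows K ss) pvKey).filter ((fun r => pvKey r == v) ∘ pvUpd K s i)
              = (PySem.List.sorted (pvRows K ss) pvKey).filter (fun r => pvKey r == v) := by
            apply List.filter_congr
            intro r hr
            simp only [Function.comp_apply]
            rw [hupdkey r (hperm.mem_iff.mp hr)]
          rw [h2, pv_sorted_filter]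
        rw [hold, pv_filter_rows_eq, pv_filter_rows_eq]
        by_cases hv : v = i
        · -- the class of the fresh index: exactly the orgs first matched in s, in key order
          subst hv
          have hoe : K.filter (fun o => !decide (pvIds ss o = []) && ((pvIds ss o).headD 0 == i)) = [] := by
            rw [List.filter_eq_nil_iff]
            intro o _
            by_cases h : pvIds ss o = []
            · simp [h]
            · have := hheadlt o h
              simp only [h, decide_false, Bool.not_false, Bool.true_and, beq_iff_eq]
              omega
          rw [hoe]
          simp only [List.map_nil, List.nil_append]
          have hnf : (pvNews K s i D).filter (fun r => pvKey r == i) = pvNews K s i D := by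
            apply List.filter_eq_self.mpr
            intro r hr
            unfold pvNews at hr
            rcases List.mem_map.mp hr with ⟨o, _, rfl⟩
            simp [pvKey]
          rw [hnf]
          unfold pvNews
          have hpred : ∀ o ∈ K, (pvMatched s o && !D.contains o)
              = (!decide (pvIds (ss ++ [s]) o = []) && ((pvIds (ss ++ [s]) o).headD 0 == i)) := by
            intro o ho
            rw [hcontb o ho]
            by_cases h : pvIds ss o = []
            · by_cases hm : pvMatched s o
              · simp [pvIds_snoc, h, hm, ← hidef]
              · simp [pvIds_snoc, h, hm]
            · have h1 := hheads' o h
              have h2 := hheadlt o h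
              have h3 := hids_ne o h
              rw [h1]
              simp [h, h3]
              simp at h2
              omega
          rw [List.filter_congr hpred]
          apply List.map_congr_left
          intro o ho
          have h2 := (List.mem_filter.mp ho).2
          rw [← hpred o (List.mem_filter.mp ho).1] at h2
          simp only [Bool.and_eq_true] at h2
          obtain ⟨hm, hc⟩ := h2
          rw [hcontb o (List.mem_filter.mp ho).1] at hc
          have h : pvIds ss o = [] := by
            by_contra hne
            simp [hne] at hc
          rw [pvIds_snoc, h]
          simp [hm, hidef]
        · -- an old class: untouched by the new sentence, and the new rows stay out of it
          have hnf : (pvNews K s i D).filter (fun r => pvKey r == v) = [] := by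
            rw [List.filter_eq_nil_iff]
            intro r hr
            unfold pvNews at hr
            rcases List.mem_map.mp hr with ⟨o, _, rfl⟩
            simp only [pvKey, List.headD_cons, beq_iff_eq]
            omega
          rw [hnf, List.append_nil]
          have hpred : ∀ o ∈ K,
              (!decide (pvIds ss o = []) && ((pvIds ss o).headD 0 == v))
                = (!decide (pvIds (ss ++ [s]) o = []) && ((pvIds (ss ++ [s]) o).headD 0 == v)) := by
            intro o _
            by_cases h : pvIds ss o = []
            · by_cases hm : pvMatched s o
              · rw [pvIds_snoc, h]
                simp [hm, ← hidef, Ne.symm hv]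
              · rw [pvIds_snoc, h]
                simp [hm]
            · have h1 := hheads' o h
              have h3 := hids_ne o h
              rw [h1]
              simp [h, h3]
          rw [← List.filter_congr hpred, List.map_map]
          apply List.map_congr_left
          intro o ho
          have hoK : o ∈ K := (List.mem_filter.mp ho).1
          simp only [Function.comp_apply]
          unfold pvUpd
          by_cases hm : pvMatched s o
          · rw [if_pos ⟨hoK, hm⟩, pvIds_snoc]
            simp [hm, hidef]
          · rw [if_neg (by rintro ⟨_, hcon⟩; exact hm hcon), pvIds_snoc]
            simp [hm]

-- (6) B-side bridges
theorem pv_enumerate_map (ss : List String) : ∀ n : Int,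
    PySem.List.enumerate (ss.map PySem.Str.lower) n
      = (PySem.List.enumerate ss n).map (fun p => (p.1, PySem.Str.lower p.2)) := by
  induction ss with
  | nil => intro n; simp [PySem.List.enumerate_nil]
  | cons s t ih =>
      intro n
      rw [List.map_cons, PySem.List.enumerate_cons, PySem.List.enumerate_cons, ih (n + 1),
          List.map_cons]

theorem pvBIds_eq (ss : List String) (o : String) :
    pvBIds (ss.map PySem.Str.lower) o = pvIds ss o := by
  unfold pvBIds pvIds pvMatched
  rw [pv_enumerate_map ss 1, List.filter_map, List.map_map]
  rfl

theorem pv_rows_fold (ss : List String) : ∀ (K : List String) (acc : List (String × List Int)),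
    K.foldl (fun rows organ =>
        let ids := pvBIds (ss.map PySem.Str.lower) organ
        if ids = [] then rows else rows ++ [(organ, ids)]) acc
      = acc ++ pvRows K ss := by
  intro K
  induction K with
  | nil => intro acc; simp [pvRows]
  | cons o K' ih =>
      intro acc
      show K'.foldl _ (let ids := pvBIds (ss.map PySem.Str.lower) o
          if ids = [] then acc else acc ++ [(o, ids)]) = _
      rw [ih]
      by_cases h : pvIds ss o = []
      · simp [pvBIds_eq, pvRows, List.filter_cons, h]
      · simp [pvBIds_eq, pvRows, List.filter_cons, h]

theorem pvB_rows (K ss : List String) :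
    K.foldl (fun rows organ =>
        let ids := pvBIds (ss.map PySem.Str.lower) organ
        if ids = [] then rows else rows ++ [(organ, ids)]) []
      = pvRows K ss := by
  rw [pv_rows_fold ss K []]
  rfl

theorem pv_update_items : ∀ (zs : List (String × List Int)) (d : PySem.Dict String (List Int)),
    (zs.map Prod.fst).Nodup → (∀ k ∈ zs.map Prod.fst, d.contains k = false) →
    (d.update zs).items = d.items ++ zs := by
  intro zs
  induction zs with
  | nil => intro d _ _; simp [PySem.Dict.update]
  | cons p t ih =>
      intro d hn hdisj
      have hc : d.contains p.1 = false := hdisj p.1 (by simp)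
      have hstep : d.update (p :: t) = (d.insert p.1 p.2).update t := rfl
      have hn' : (t.map Prod.fst).Nodup := (List.nodup_cons.mp hn).2
      have hp1 : p.1 ∉ t.map Prod.fst := (List.nodup_cons.mp hn).1
      have hdisj' : ∀ k ∈ t.map Prod.fst, (d.insert p.1 p.2).contains k = false := by
        intro k hk
        rw [PySem.Dict.contains_insert]
        have hne : k ≠ p.1 := by rintro rfl; exact hp1 hk
        have hk2 : d.contains k = false := hdisj k (by rw [List.map_cons]; exact List.mem_cons_of_mem _ hk)
        simp [hne, hk2]
      rw [hstep, ih _ hn' hdisj', PySem.Dict.items_insert_of_not_contains d _ hc]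
      simp

theorem pv_ofList_items (zs : List (String × List Int)) (h : (zs.map Prod.fst).Nodup) :
    (PySem.Dict.ofList zs).items = zs := by
  show (PySem.Dict.empty.update zs).items = zs
  rw [pv_update_items zs PySem.Dict.empty h (by intro k _; rfl)]
  rfl

-- ===== VERDICT (by name: the statement is the Claim_ definition above) =====
theorem find_organ_context_spec : Claim_equal_find_organ_context := by
  intro document organization _
  show find_organ_context document organization = find_organ_context_alt document organization
  simp only [find_organ_context, find_organ_context_alt]
  generalize hssE : (PySem.Str.split? document ".").getD [] = ss
  generalize hKE : PySem.List.dedup (organization.map Prod.fst) = K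
  have hK : K.Nodup := hKE ▸ PySem.List.nodup_dedup _
  have hperm : (PySem.List.sorted (pvRows K ss) pvKey).Perm (pvRows K ss) :=
    PySem.List.sorted_perm _ _ false
  have hnodup : ((PySem.List.sorted (pvRows K ss) pvKey).map Prod.fst).Nodup :=
    ((hperm.map Prod.fst).nodup_iff).mpr (by rw [pvRows_map_fst]; exact hK.filter _)
  rw [pvB_rows K ss, pvA_count K ss 0 PySem.Dict.empty, pvA_fold K ss 0 PySem.Dict.empty,
      show ((0 : Int) + 1) = 1 by decide, pv_main K hK ss]
  show _ = ((PySem.Dict.ofList (PySem.List.sorted (pvRows K ss) pvKey)).items,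
      (((ss.map PySem.Str.lower).length : Nat) : Int))
  rw [pv_ofList_items _ hnodup]
  rw [Prod.mk.injEq]
  refine ⟨rfl, ?_⟩
  simp
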